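-- pv_equiv track=rewrite | github.com/kyleguggy13/FFE-pyRevit | FFE-pyRevit.extension/FFE-pyRevit.tab/MEPTools.panel/DuctNetwork.pushbutton/script.py | find_unique_shortest_path
-- ===== SOURCE A (Python) =====
-- from collections import defaultdict, deque
--
-- def backtrack_shortest_paths(node, predecessors, source_sections, partial_path, results, limit):
--     """Collect up to limit shortest paths from any source to node."""
--     if len(results) >= limit:
--         return
--
--     if node in source_sections:
--         candidate = list(reversed(partial_path + [node]))
--         results.append(candidate)
--         return
--
--     for previous_node in sorted(list(predecessors.get(node, set()))):
--         backtrack_shortest_paths(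
--             previous_node,
--             predecessors,
--             source_sections,
--             partial_path + [node],
--             results,
--             limit
--         )
--         if len(results) >= limit:
--             return
--
-- def find_unique_shortest_path(section_graph, source_sections, target_sections):
--     """Return a unique shortest path or an ambiguity/error reason."""
--     source_sections = set(source_sections)
--     target_sections = set(target_sections)
--
--     if not source_sections:
--         return None, "No root sections were resolved."
--
--     if not target_sections:
--         return None, "No endpoint sections were resolved."
--
--     distances = {}
--     predecessors = defaultdict(set)
--     queue = deque()
--
--     for section_number in sorted(list(source_sections)):
--         distances[section_number] = 0
--         queue.append(section_number)
--
--     while queue: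
--         current = queue.popleft()
--         for neighbor in sorted(list(section_graph.get(current, set()))):
--             next_distance = distances[current] + 1
--             if neighbor not in distances:
--                 distances[neighbor] = next_distance
--                 predecessors[neighbor].add(current)
--                 queue.append(neighbor)
--             elif distances[neighbor] == next_distance:
--                 predecessors[neighbor].add(current)
--
--     reachable_targets = [section for section in sorted(list(target_sections)) if section in distances]
--     if not reachable_targets:
--         return None, "No path from the root network reaches the endpoint anchor."
--
--     shortest_distance = min([distances[section] for section in reachable_targets])
--     best_targets = [section for section in reachable_targets if distances[section] == shortest_distance]
--
--     all_paths = []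
--     for target_section in best_targets:
--         backtrack_shortest_paths(
--             target_section,
--             predecessors,
--             source_sections,
--             [],
--             all_paths,
--             2
--         )
--         if len(all_paths) >= 2:
--             break
--
--     unique_paths = []
--     seen_paths = set()
--     for path in all_paths:
--         key = tuple(path)
--         if key not in seen_paths:
--             unique_paths.append(path)
--             seen_paths.add(key)
--
--     if len(unique_paths) != 1:
--         return None, "Multiple equally short section paths were found."
--
--     return unique_paths[0], None
-- ===== SOURCE B (Python) =====
-- from collections import defaultdict, deque
--
-- def find_unique_shortest_path(section_graph, source_sections, target_sections):
--     """Return a unique shortest path or an ambiguity/error reason."""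
--     source_sections = set(source_sections)
--     target_sections = set(target_sections)
--
--     if not source_sections:
--         return None, "No root sections were resolved."
--
--     if not target_sections:
--         return None, "No endpoint sections were resolved."
--
--     # BFS from all sources (unchanged): distances + shortest-path predecessor DAG.
--     distances = {}
--     predecessors = defaultdict(set)
--     queue = deque()
--
--     for section_number in sorted(list(source_sections)):
--         distances[section_number] = 0
--         queue.append(section_number)
--
--     while queue:
--         current = queue.popleft()
--         for neighbor in sorted(list(section_graph.get(current, set()))):
--             next_distance = distances[current] + 1
--             if neighbor not in distances:
--                 distances[neighbor] = next_distance
--                 predecessors[neighbor].add(current)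
--                 queue.append(neighbor)
--             elif distances[neighbor] == next_distance:
--                 predecessors[neighbor].add(current)
--
--     reachable_targets = [section for section in sorted(list(target_sections)) if section in distances]
--     if not reachable_targets:
--         return None, "No path from the root network reaches the endpoint anchor."
--
--     shortest_distance = min([distances[section] for section in reachable_targets])
--     best_targets = [section for section in reachable_targets if distances[section] == shortest_distance]
--
--     # Dynamic programming in increasing-distance order instead of recursive
--     # backtracking: keep at most TWO shortest source->node paths per node.
--     order = sorted(distances, key=lambda v: distances[v])
--     paths = {}
--     for v in order:
--         if v in source_sections:
--             paths[v] = [[v]]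
--         else:
--             collected = []
--             for p in sorted(list(predecessors.get(v, set()))):
--                 for q in paths.get(p, []):
--                     collected.append(q + [v])
--             paths[v] = collected[:2]
--
--     candidates = []
--     for t in best_targets:
--         candidates.extend(paths.get(t, []))
--     candidates = candidates[:2]
--
--     if len(candidates) != 1:
--         return None, "Multiple equally short section paths were found."
--
--     return candidates[0], None
-- ===== Notes on version B (the rewrite author's own statement) =====
-- stated objective: alternative
-- what changed: The recursive limit-2 backtracking enumeration of shortest paths (with dedup) is replaced by a dynamic program over nodes in increasing BFS-distance order that keeps at most two shortest source-to-node paths per node and reads the answer off the best targets; the multi-source BFS is kept unchanged.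
import Mathlib
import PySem

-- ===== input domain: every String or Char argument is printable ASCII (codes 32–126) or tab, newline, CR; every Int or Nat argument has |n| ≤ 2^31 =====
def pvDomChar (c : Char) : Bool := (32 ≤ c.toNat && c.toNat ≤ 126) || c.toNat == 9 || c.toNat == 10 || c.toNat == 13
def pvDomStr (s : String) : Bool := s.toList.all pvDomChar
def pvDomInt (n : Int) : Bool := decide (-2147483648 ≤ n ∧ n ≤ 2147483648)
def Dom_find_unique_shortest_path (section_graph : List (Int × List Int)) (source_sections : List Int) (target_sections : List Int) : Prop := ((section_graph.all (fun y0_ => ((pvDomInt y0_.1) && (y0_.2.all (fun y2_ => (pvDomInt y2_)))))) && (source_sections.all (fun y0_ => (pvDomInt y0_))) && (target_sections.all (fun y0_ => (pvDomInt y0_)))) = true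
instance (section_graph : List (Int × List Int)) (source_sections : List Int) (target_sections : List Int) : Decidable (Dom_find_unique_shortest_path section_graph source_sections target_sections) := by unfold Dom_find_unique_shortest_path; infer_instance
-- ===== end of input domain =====

-- B replaces the recursive limit-2 backtracking path enumeration by a dynamic program
-- in increasing-distance order that keeps at most two shortest paths per node (the
-- shared multi-source BFS is unchanged); objective: alternative algorithm, same results.


-- ===== PORT A =====

-- sorted(list(xs)) on integers
def pvSortedInts (xs : List Int) : List Int := PySem.List.sorted xs (fun x => x) false

-- one neighbor of the BFS inner loop (state: distances, predecessors, queue)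
def pvBfsStep (current : Int)
    (st : PySem.Dict Int Int × PySem.Dict Int (PySem.Set Int) × List Int) (neighbor : Int) :
    PySem.Dict Int Int × PySem.Dict Int (PySem.Set Int) × List Int :=
  let dist := st.1; let preds := st.2.1; let queue := st.2.2
  let nd := dist.getD current 0 + 1          -- distances[current] + 1 (current is always a key)
  if dist.contains neighbor = false then
    (dist.insert neighbor nd,
     preds.insert neighbor (PySem.Set.add (preds.getD neighbor []) current),
     queue ++ [neighbor])
  else if dist.getD neighbor 0 = nd then
    (dist, preds.insert neighbor (PySem.Set.add (preds.getD neighbor []) current), queue)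
  else st

-- 'while queue:' — fuel only makes the loop total; each node is dequeued at most once,
-- so fuel = len(source_sections) + Σ(1+len(adj)) + 1 is never exhausted
def pvBfsLoop (fuel : Nat) (graph : PySem.Dict Int (List Int))
    (dist : PySem.Dict Int Int) (preds : PySem.Dict Int (PySem.Set Int)) (queue : List Int) :
    PySem.Dict Int Int × PySem.Dict Int (PySem.Set Int) :=
  match fuel, queue with
  | 0, _ => (dist, preds)
  | _ + 1, [] => (dist, preds)
  | fuel + 1, current :: rest =>
    let st := (pvSortedInts (graph.getD current [])).foldl (pvBfsStep current) (dist, preds, rest)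
    pvBfsLoop fuel graph st.1 st.2.1 st.2.2

-- the whole BFS phase (identical lines in A and in B: one shared transliteration)
def pvSetup (section_graph : List (Int × List Int)) (source_sections : List Int)
    (src : PySem.Set Int) : PySem.Dict Int Int × PySem.Dict Int (PySem.Set Int) :=
  let graph : PySem.Dict Int (List Int) := PySem.Dict.mk section_graph
  let init := (pvSortedInts src).foldl
    (fun (st : PySem.Dict Int Int × List Int) s => (st.1.insert s 0, st.2 ++ [s]))
    (PySem.Dict.empty, [])
  let fuel := source_sections.length + section_graph.foldl (fun a p => a + (1 + p.2.length)) 0 + 1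
  pvBfsLoop fuel graph init.1 PySem.Dict.empty init.2

-- backtrack_shortest_paths; fuel = len(distances)+1 only makes the recursion total:
-- every predecessor is strictly closer to the sources, and distances are < len(distances)
def pvBacktrack (fuel : Nat) (node : Int) (preds : PySem.Dict Int (PySem.Set Int))
    (src : PySem.Set Int) (partialPath : List Int) (results : List (List Int)) (limit : Nat) :
    List (List Int) :=
  match fuel with
  | 0 => results
  | fuel + 1 =>
    if limit ≤ results.length then results
    else if PySem.Set.contains src node then results ++ [(partialPath ++ [node]).reverse]
    else (pvSortedInts (preds.getD node [])).foldl
      (fun res p =>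
        if limit ≤ res.length then res
        else pvBacktrack fuel p preds src (partialPath ++ [node]) res limit) results

def find_unique_shortest_path (section_graph : List (Int × List Int)) (source_sections : List Int) (target_sections : List Int) : Option (List Int) × Option String :=
  let src : PySem.Set Int := PySem.Set.ofList source_sections
  let tgt : PySem.Set Int := PySem.Set.ofList target_sections
  if src = [] then (none, some "No root sections were resolved.")
  else if tgt = [] then (none, some "No endpoint sections were resolved.")
  else
    let dp := pvSetup section_graph source_sections src
    let dist := dp.1; let preds := dp.2
    let reachable := (pvSortedInts tgt).filter (fun s => dist.contains s)
    if reachable = [] then (none, some "No path from the root network reaches the endpoint anchor.")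
    else
      let shortest := (PySem.List.min? (reachable.map (fun s => dist.getD s 0)) (fun x => x)).getD 0
        -- min of a list that is provably nonempty here
      let best := reachable.filter (fun s => dist.getD s 0 == shortest)
      -- 'for target in best: backtrack(...); if len>=2: break' — the break is the identity
      -- because pvBacktrack returns its results unchanged once the limit is reached
      let allPaths := best.foldl (fun res t => pvBacktrack (dist.size + 1) t preds src [] res 2) []
      let uniq := (allPaths.foldl
        (fun (st : List (List Int) × PySem.Set (List Int)) p =>
          if PySem.Set.contains st.2 p then st else (st.1 ++ [p], PySem.Set.add st.2 p))
        ([], PySem.Set.empty)).1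
      if uniq.length ≠ 1 then (none, some "Multiple equally short section paths were found.")
      else (uniq[0]?, none)

-- ===== PORT B =====

def find_unique_shortest_path_alt (section_graph : List (Int × List Int)) (source_sections : List Int) (target_sections : List Int) : Option (List Int) × Option String :=
  let src : PySem.Set Int := PySem.Set.ofList source_sections
  let tgt : PySem.Set Int := PySem.Set.ofList target_sections
  if src = [] then (none, some "No root sections were resolved.")
  else if tgt = [] then (none, some "No endpoint sections were resolved.")
  else
    let dp := pvSetup section_graph source_sections src
    let dist := dp.1; let preds := dp.2
    let reachable := (pvSortedInts tgt).filter (fun s => dist.contains s)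
    if reachable = [] then (none, some "No path from the root network reaches the endpoint anchor.")
    else
      let shortest := (PySem.List.min? (reachable.map (fun s => dist.getD s 0)) (fun x => x)).getD 0
      let best := reachable.filter (fun s => dist.getD s 0 == shortest)
      -- DP in increasing-distance order: at most two shortest source->node paths per node
      let order := PySem.List.sorted dist.keys (fun v => dist.getD v 0) false
      let paths := order.foldl
        (fun (paths : PySem.Dict Int (List (List Int))) v =>
          if PySem.Set.contains src v then paths.insert v [[v]]
          else
            let collected := (pvSortedInts (preds.getD v [])).foldl
              (fun acc p => (paths.getD p []).foldl (fun a q => a ++ [q ++ [v]]) acc) []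
            paths.insert v (collected.take 2))
        PySem.Dict.empty
      let candidates := (best.foldl (fun acc t => acc ++ paths.getD t []) []).take 2
      if candidates.length ≠ 1 then (none, some "Multiple equally short section paths were found.")
      else (candidates[0]?, none)

-- ===== PRECONDITION & SPEC =====
def Spec_find_unique_shortest_path (section_graph : List (Int × List Int)) (source_sections : List Int) (target_sections : List Int) (out : Option (List Int) × Option String) : Prop := out = find_unique_shortest_path_alt section_graph source_sections target_sections
instance (section_graph : List (Int × List Int)) (source_sections : List Int) (target_sections : List Int) (out : Option (List Int) × Option String) : Decidable (Spec_find_unique_shortest_path section_graph source_sections target_sections out) := by unfold Spec_find_unique_shortest_path; infer_instance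

-- ===== CLAIM (what is proved, stated in full; the proofs are below) =====
def Claim_equal_find_unique_shortest_path : Prop := ∀ (section_graph : List (Int × List Int)) (source_sections : List Int) (target_sections : List Int), Dom_find_unique_shortest_path section_graph source_sections target_sections → Spec_find_unique_shortest_path section_graph source_sections target_sections (find_unique_shortest_path section_graph source_sections target_sections)

-- ===== LEMMAS AND PROOFS =====

-- ---------- generic list facts ----------

theorem pv_foldl_preserve {σ α : Type} {P : σ → Prop} (f : σ → α → σ)
    (h : ∀ s x, P s → P (f s x)) : ∀ (l : List α) (s : σ), P s → P (l.foldl f s) := by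
  intro l
  induction l with
  | nil => intro s hs; exact hs
  | cons a l ih => intro s hs; exact ih _ (h s a hs)

-- glue for an accumulator that takes up to (n - len acc) elements at a time
theorem pv_take_glue {α : Type} (res xs ys : List α) (n : Nat) :
    (res ++ xs.take (n - res.length)) ++ ys.take (n - (res ++ xs.take (n - res.length)).length)
      = res ++ (xs ++ ys).take (n - res.length) := by
  have hlen : n - (res.length + min (n - res.length) xs.length) = n - res.length - xs.length := by
    omega
  simp [List.take_append, List.length_take, hlen]

-- take n only looks at the first n elements of each chunk
theorem pv_take_flatMap_take {α β : Type} (n : Nat) (f : α → List β) :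
    ∀ (l : List α) (m : Nat), m ≤ n →
      (l.flatMap (fun x => (f x).take n)).take m = (l.flatMap f).take m := by
  intro l
  induction l with
  | nil => intro m _; rfl
  | cons a l ih =>
    intro m hm
    simp only [List.flatMap_cons, List.take_append]
    rw [List.take_take, Nat.min_eq_left hm, ih _ (by omega)]
    congr 2
    simp [List.length_take]
    omega

theorem pv_nodup_flatMap {α β : Type} (f : α → List β) :
    ∀ (l : List α), l.Nodup → (∀ a ∈ l, (f a).Nodup) →
      (∀ a ∈ l, ∀ b ∈ l, a ≠ b → ∀ q ∈ f a, q ∉ f b) →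
      (l.flatMap f).Nodup := by
  intro l
  induction l with
  | nil => intro _ _ _; simp
  | cons a l ih =>
    intro hnd hn hd
    simp only [List.flatMap_cons]
    rw [List.nodup_append]
    refine ⟨hn a (by simp), ih hnd.of_cons (fun b hb => hn b (by simp [hb]))
      (fun x hx y hy hxy => hd x (by simp [hx]) y (by simp [hy]) hxy), ?_⟩
    intro q hq r hr
    rintro rfl
    obtain ⟨b, hb, hqb⟩ := List.mem_flatMap.1 hr
    have hab : a ≠ b := by rintro rfl; exact (List.nodup_cons.1 hnd).1 hb
    exact hd a (by simp) b (by simp [hb]) hab q hq hqb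

-- ---------- enumeration of all shortest paths (proof-side specification) ----------

def pvE (src : PySem.Set Int) (pr : Int → List Int) : Nat → Int → List (List Int)
  | 0, _ => []
  | f + 1, v =>
    if PySem.Set.contains src v then [[v]]
    else (pr v).foldl (fun acc p => acc ++ (pvE src pr f p).map (· ++ [v])) []

def pvRk (dist : PySem.Dict Int Int) (v : Int) : Nat := (dist.getD v 0).toNat

def pvPredsOf (preds : PySem.Dict Int (PySem.Set Int)) (v : Int) : List Int :=
  pvSortedInts (preds.getD v [])

def pvEfix (src : PySem.Set Int) (pr : Int → List Int) (rk : Int → Nat) (v : Int) :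
    List (List Int) := pvE src pr (rk v + 1) v

theorem pvE_stable (src : PySem.Set Int) (pr : Int → List Int) (rk : Int → Nat)
    (hr : ∀ v, ∀ p ∈ pr v, rk p < rk v) :
    ∀ (f1 f2 : Nat) (v : Int), rk v < f1 → rk v < f2 →
      pvE src pr f1 v = pvE src pr f2 v := by
  intro f1
  induction f1 with
  | zero => intro f2 v h; omega
  | succ f1 ih =>
    intro f2 v h1 h2
    match f2, h2 with
    | f2 + 1, h2 =>
      simp only [pvE]
      split
      · rfl
      · refine PySem.List.foldl_congr_mem' _ _ _ _ ?_
        intro p hp acc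
        have hpv := hr v p hp
        rw [ih f2 p (by omega) (by omega)]

theorem pvEfix_unfold (src : PySem.Set Int) (pr : Int → List Int) (rk : Int → Nat)
    (hr : ∀ v, ∀ p ∈ pr v, rk p < rk v) (v : Int) :
    pvEfix src pr rk v = if PySem.Set.contains src v then [[v]]
      else (pr v).foldl (fun acc p => acc ++ (pvEfix src pr rk p).map (· ++ [v])) [] := by
  unfold pvEfix
  conv_lhs => rw [pvE]
  split
  · rfl
  · refine PySem.List.foldl_congr_mem' _ _ _ _ ?_
    intro p hp acc
    rw [pvE_stable src pr rk hr (rk v) (rk p + 1) p (hr v p hp) (by omega)]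

theorem pvEfix_flat (src : PySem.Set Int) (pr : Int → List Int) (rk : Int → Nat)
    (hr : ∀ v, ∀ p ∈ pr v, rk p < rk v) (v : Int)
    (hv : PySem.Set.contains src v = false) :
    pvEfix src pr rk v = (pr v).flatMap (fun p => (pvEfix src pr rk p).map (· ++ [v])) := by
  rw [pvEfix_unfold src pr rk hr v, hv]
  rw [if_neg (by simp), PySem.List.foldl_append_eq_flatMap, List.nil_append]

theorem pvEfix_ends (src : PySem.Set Int) (pr : Int → List Int) (rk : Int → Nat)
    (hr : ∀ v, ∀ p ∈ pr v, rk p < rk v) (v : Int) :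
    ∀ q ∈ pvEfix src pr rk v, ∃ q', q = q' ++ [v] := by
  rw [pvEfix_unfold src pr rk hr v]
  split
  · intro q hq
    simp only [List.mem_singleton] at hq
    exact ⟨[], by simp [hq]⟩
  · rw [PySem.List.foldl_append_eq_flatMap, List.nil_append]
    intro q hq
    obtain ⟨p, _, hq2⟩ := List.mem_flatMap.1 hq
    obtain ⟨q', _, hq3⟩ := List.mem_map.1 hq2
    exact ⟨q', hq3.symm⟩

theorem pvEfix_nodup (src : PySem.Set Int) (pr : Int → List Int) (rk : Int → Nat)
    (hr : ∀ v, ∀ p ∈ pr v, rk p < rk v) (hnd : ∀ v, (pr v).Nodup) :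
    ∀ (n : Nat) (v : Int), rk v < n → (pvEfix src pr rk v).Nodup := by
  intro n
  induction n with
  | zero => intro v h; omega
  | succ n ih =>
    intro v hv
    rw [pvEfix_unfold src pr rk hr v]
    split
    · simp
    · rw [PySem.List.foldl_append_eq_flatMap, List.nil_append]
      refine pv_nodup_flatMap _ _ (hnd v) ?_ ?_
      · intro p hp
        exact List.Nodup.map (fun a b h => by simpa using h)
          (ih p (by have := hr v p hp; omega))
      · intro a ha b hb hab q hq hq'
        obtain ⟨qa, hqa, hqae⟩ := List.mem_map.1 hq
        obtain ⟨qb, hqb, hqbe⟩ := List.mem_map.1 hq'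
        have hqq : qa = qb := by
          have := hqae.trans hqbe.symm
          simpa using this
        have hqb2 : qa ∈ pvEfix src pr rk b := by rw [hqq]; exact hqb
        obtain ⟨qa', rfl⟩ := pvEfix_ends src pr rk hr a qa hqa
        obtain ⟨qb', he⟩ := pvEfix_ends src pr rk hr b _ hqb2
        have h1 : (qa' ++ [a]).getLast? = some a := List.getLast?_concat
        have h2 : (qa' ++ [a]).getLast? = some b := by rw [he]; exact List.getLast?_concat
        exact hab (by rw [h1] at h2; exact (Option.some_inj.1 h2))

-- ---------- A side: the fuel-bounded backtracking collects a prefix of pvEfix ----------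

theorem pvBacktrack_spec (preds : PySem.Dict Int (PySem.Set Int)) (src : PySem.Set Int)
    (rk : Int → Nat)
    (hr : ∀ v, ∀ p ∈ pvPredsOf preds v, rk p < rk v) :
    ∀ (f : Nat) (node : Int) (partialPath : List Int) (res : List (List Int)) (limit : Nat),
      rk node < f →
      pvBacktrack f node preds src partialPath res limit
        = res ++ ((pvEfix src (pvPredsOf preds) rk node).map
            (· ++ partialPath.reverse)).take (limit - res.length) := by
  intro f
  induction f with
  | zero => intro node _ _ _ h; omega
  | succ f ih =>
    intro node partialPath res limit hf
    rw [pvBacktrack]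
    by_cases hfull : limit ≤ res.length
    · rw [if_pos hfull]
      have : limit - res.length = 0 := by omega
      simp [this]
    · rw [if_neg hfull]
      by_cases hsrc : PySem.Set.contains src node
      · rw [if_pos hsrc, pvEfix_unfold src (pvPredsOf preds) rk hr node, if_pos hsrc]
        have : 1 ≤ limit - res.length := by omega
        simp [List.take_of_length_le, this]
      · rw [if_neg hsrc]
        -- inner fold over the sorted predecessors
        have hfold : ∀ (ps : List Int) (res : List (List Int)), (∀ p ∈ ps, rk p < f) →
            ps.foldl (fun res p => if limit ≤ res.length then res
              else pvBacktrack f p preds src (partialPath ++ [node]) res limit) res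
            = res ++ (ps.flatMap (fun p => (pvEfix src (pvPredsOf preds) rk p).map
                (· ++ (partialPath ++ [node]).reverse))).take (limit - res.length) := by
          intro ps
          induction ps with
          | nil => intro res _; simp
          | cons p ps ihp =>
            intro res hps
            simp only [List.foldl_cons]
            by_cases hfull2 : limit ≤ res.length
            · rw [if_pos hfull2, ihp res (fun q hq => hps q (by simp [hq]))]
              have : limit - res.length = 0 := by omega
              simp [this]
            · rw [if_neg hfull2, ih p (partialPath ++ [node]) res limit (hps p (by simp)),
                ihp _ (fun q hq => hps q (by simp [hq]))]
              rw [pv_take_glue, List.flatMap_cons]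
        rw [hfold _ res (fun p hp => by have := hr node p hp; omega)]
        rw [pvEfix_flat src (pvPredsOf preds) rk hr node (by simpa using hsrc)]
        congr 2
        rw [List.map_flatMap]
        refine List.flatMap_congr ?_
        intro p _
        simp [Function.comp_def, List.map_map]

-- A's loop over the best targets
theorem pvAllPaths_spec (preds : PySem.Dict Int (PySem.Set Int)) (src : PySem.Set Int)
    (rk : Int → Nat) (F : Nat)
    (hr : ∀ v, ∀ p ∈ pvPredsOf preds v, rk p < rk v) :
    ∀ (ts : List Int) (res : List (List Int)), (∀ t ∈ ts, rk t < F) →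
      ts.foldl (fun res t => pvBacktrack F t preds src [] res 2) res
        = res ++ (ts.flatMap (pvEfix src (pvPredsOf preds) rk)).take (2 - res.length) := by
  intro ts
  induction ts with
  | nil => intro res _; simp
  | cons t ts ih =>
    intro res hts
    simp only [List.foldl_cons]
    rw [pvBacktrack_spec preds src rk hr F t [] res 2 (hts t (by simp)),
      ih _ (fun q hq => hts q (by simp [hq]))]
    simp only [List.reverse_nil, List.append_nil, List.map_id']
    rw [pv_take_glue, List.flatMap_cons]

-- A's seen-set dedup loop is the identity on a Nodup list
theorem pvDedup_id :
    ∀ (l : List (List Int)) (acc : List (List Int)) (seen : PySem.Set (List Int)),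
      l.Nodup → (∀ x ∈ l, PySem.Set.contains seen x = false) →
      (l.foldl (fun (st : List (List Int) × PySem.Set (List Int)) p =>
          if PySem.Set.contains st.2 p then st else (st.1 ++ [p], PySem.Set.add st.2 p))
        (acc, seen)).1 = acc ++ l := by
  intro l
  induction l with
  | nil => intro acc seen _ _; simp
  | cons a l ih =>
    intro acc seen hnd hseen
    simp only [List.foldl_cons]
    rw [if_neg (by rw [hseen a (by simp)]; simp)]
    rw [ih _ _ hnd.of_cons ?_]
    · simp
    · intro x hx
      have hxa : x ≠ a := fun h => (List.nodup_cons.1 hnd).1 (h ▸ hx)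
      have : ¬ x ∈ PySem.Set.add seen a := by
        rw [PySem.Set.mem_add]
        rintro (hmem | hmem)
        · rw [← PySem.Set.contains_iff, hseen x (by simp [hx])] at hmem
          exact absurd hmem (by simp)
        · exact hxa hmem
      rw [← Bool.not_eq_true, PySem.Set.contains_iff]
      exact this

-- ---------- B side: the distance-ordered DP computes take 2 of pvEfix ----------

theorem pvDP_spec (dist : PySem.Dict Int Int) (preds : PySem.Dict Int (PySem.Set Int))
    (src : PySem.Set Int)
    (hr : ∀ v, ∀ p ∈ pvPredsOf preds v, pvRk dist p < pvRk dist v)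
    (hkey : ∀ v, ∀ p ∈ pvPredsOf preds v, dist.getD p 0 < dist.getD v 0) :
    ∀ (l2 : List Int) (processed : List Int) (d : PySem.Dict Int (List (List Int))),
      (∀ w, d.getD w [] = if w ∈ processed
        then (pvEfix src (pvPredsOf preds) (pvRk dist) w).take 2 else []) →
      (∀ v ∈ l2, ∀ p ∈ pvPredsOf preds v, p ∈ processed ++ l2) →
      (processed ++ l2).Pairwise (fun a b => dist.getD a 0 ≤ dist.getD b 0) →
      ∀ w, (l2.foldl (fun (paths : PySem.Dict Int (List (List Int))) v =>
          if PySem.Set.contains src v then paths.insert v [[v]]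
          else
            let collected := (pvSortedInts (preds.getD v [])).foldl
              (fun acc p => (paths.getD p []).foldl (fun a q => a ++ [q ++ [v]]) acc) []
            paths.insert v (collected.take 2)) d).getD w []
        = if w ∈ processed ++ l2
            then (pvEfix src (pvPredsOf preds) (pvRk dist) w).take 2 else [] := by
  intro l2
  induction l2 with
  | nil => intro processed d hprev _ _ w; simpa using hprev w
  | cons v l2 ih =>
    intro processed d hprev hmem hpair w
    simp only [List.foldl_cons]
    have hstep : ∀ X, ((d.insert v X).getD · ([] : List (List Int))) =
        fun w => if w = v then X else d.getD w [] := by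
      intro X; funext w; rw [PySem.Dict.getD_insert]
    -- predecessors of v are already processed
    have hpv : ∀ p ∈ pvPredsOf preds v, p ∈ processed := by
      intro p hp
      have hin := hmem v (by simp) p hp
      rcases List.mem_append.1 hin with h | h
      · exact h
      · exfalso
        rcases List.mem_cons.1 h with hpveq | h
        · exact absurd (hpveq ▸ hkey v p hp) (lt_irrefl _)
        · have := (List.pairwise_append.1 hpair).2.1
          have hle : dist.getD v 0 ≤ dist.getD p 0 :=
            (List.pairwise_cons.1 this).1 p h
          exact absurd (hkey v p hp) (by omega)
    -- the new dictionary satisfies the invariant for processed ++ [v]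
    have hnew : ∀ (X : List (List Int)),
        X = (pvEfix src (pvPredsOf preds) (pvRk dist) v).take 2 →
        ∀ w, (d.insert v X).getD w [] = if w ∈ processed ++ [v]
          then (pvEfix src (pvPredsOf preds) (pvRk dist) w).take 2 else [] := by
      intro X hX w
      rw [PySem.Dict.getD_insert]
      by_cases hwv : w = v
      · subst hwv; simp [hX]
      · rw [if_neg hwv, hprev w]
        have : (w ∈ processed ++ [v]) ↔ (w ∈ processed) := by simp [hwv]
        simp only [this]
    have hgoal : ∀ (dnew : PySem.Dict Int (List (List Int))),
        (∀ w, dnew.getD w [] = if w ∈ processed ++ [v]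
          then (pvEfix src (pvPredsOf preds) (pvRk dist) w).take 2 else []) →
        (l2.foldl (fun (paths : PySem.Dict Int (List (List Int))) v =>
          if PySem.Set.contains src v then paths.insert v [[v]]
          else
            let collected := (pvSortedInts (preds.getD v [])).foldl
              (fun acc p => (paths.getD p []).foldl (fun a q => a ++ [q ++ [v]]) acc) []
            paths.insert v (collected.take 2)) dnew).getD w []
          = if w ∈ processed ++ v :: l2
              then (pvEfix src (pvPredsOf preds) (pvRk dist) w).take 2 else [] := by
      intro dnew hdnew
      have h1 := ih (processed ++ [v]) dnew hdnew
        (by intro u hu p hp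
            have := hmem u (by simp [hu]) p hp
            simpa using this)
        (by simpa using hpair) w
      rw [h1]
      have : (w ∈ processed ++ [v] ++ l2) ↔ (w ∈ processed ++ v :: l2) := by simp
      simp only [this]
    by_cases hsrc : PySem.Set.contains src v
    · rw [if_pos hsrc]
      refine hgoal _ (hnew [[v]] ?_)
      rw [pvEfix_unfold src (pvPredsOf preds) (pvRk dist) hr v, if_pos hsrc]
      rfl
    · rw [if_neg hsrc]
      refine hgoal _ (hnew _ ?_)
      -- collected = flatMap of capped predecessor lists
      have hcol : (pvSortedInts (preds.getD v [])).foldl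
            (fun acc p => (d.getD p []).foldl (fun a q => a ++ [q ++ [v]]) acc) []
          = (pvPredsOf preds v).flatMap
              (fun p => ((pvEfix src (pvPredsOf preds) (pvRk dist) p).take 2).map (· ++ [v])) := by
        rw [show (pvSortedInts (preds.getD v [])) = pvPredsOf preds v from rfl]
        rw [PySem.List.foldl_congr_mem' (pvPredsOf preds v) _
          (fun acc p => acc ++ ((pvEfix src (pvPredsOf preds) (pvRk dist) p).take 2).map (· ++ [v])) []
          ?_]
        · rw [PySem.List.foldl_append_eq_flatMap, List.nil_append]
        · intro p hp acc
          rw [PySem.List.foldl_append_singleton_eq_map, hprev p, if_pos (hpv p hp)]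
      rw [hcol]
      calc ((pvPredsOf preds v).flatMap
              (fun p => ((pvEfix src (pvPredsOf preds) (pvRk dist) p).take 2).map (· ++ [v]))).take 2
          = ((pvPredsOf preds v).flatMap
              (fun p => (((pvEfix src (pvPredsOf preds) (pvRk dist) p)).map (· ++ [v])).take 2)).take 2 := by
            congr 1
            refine List.flatMap_congr ?_
            intro p _
            rw [List.map_take]
        _ = ((pvPredsOf preds v).flatMap
              (fun p => ((pvEfix src (pvPredsOf preds) (pvRk dist) p)).map (· ++ [v]))).take 2 := by
            exact pv_take_flatMap_take 2 _ _ 2 (le_refl 2)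
        _ = (pvEfix src (pvPredsOf preds) (pvRk dist) v).take 2 := by
            rw [← pvEfix_flat src (pvPredsOf preds) (pvRk dist) hr v (by simpa using hsrc)]

-- ---------- BFS invariants ----------

def pvInv (dist : PySem.Dict Int Int) (preds : PySem.Dict Int (PySem.Set Int)) : Prop :=
  dist.keys.Nodup ∧
  (∀ v : Int, (preds.getD v []).Nodup) ∧
  (∀ v p : Int, p ∈ preds.getD v [] →
    ∃ dv dp, dist.get? v = some dv ∧ dist.get? p = some dp ∧ dp + 1 = dv) ∧
  (∀ (v : Int) (dv : Int), dist.get? v = some dv → 0 ≤ dv ∧ dv < dist.size)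

def pvStInv (current : Int)
    (st : PySem.Dict Int Int × PySem.Dict Int (PySem.Set Int) × List Int) : Prop :=
  pvInv st.1 st.2.1 ∧ (∀ c ∈ st.2.2, st.1.contains c = true) ∧ st.1.contains current = true

theorem pvBfsStep_inv (current neighbor : Int)
    (st : PySem.Dict Int Int × PySem.Dict Int (PySem.Set Int) × List Int)
    (h : pvStInv current st) : pvStInv current (pvBfsStep current st neighbor) := by
  obtain ⟨dist, preds, queue⟩ := st
  obtain ⟨⟨hknd, hpnd, hpp, hval⟩, hq, hc⟩ := h
  dsimp only at hknd hpnd hpp hval hq hc ⊢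
  have hdcex : ∃ dc, dist.get? current = some dc := by
    rw [PySem.Dict.contains_eq_isSome_get?] at hc
    exact Option.isSome_iff_exists.1 hc
  obtain ⟨dc, hdc⟩ := hdcex
  obtain ⟨hdc0, hdcsz⟩ := hval current dc hdc
  have hgetDc : dist.getD current 0 = dc := PySem.Dict.getD_of_get?_eq_some dist 0 hdc
  have hsome_ne : ∀ (p : Int), dist.contains p = false → ∀ q : Int, dist.get? q ≠ none → q ≠ p := by
    intro p hp q hqn hqp
    subst hqp
    rw [PySem.Dict.contains_eq_isSome_get?] at hp
    rcases hq' : dist.get? q with _ | d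
    · exact hqn hq'
    · rw [hq'] at hp; simp at hp
  simp only [pvBfsStep]
  by_cases hnb : dist.contains neighbor = false
  · rw [if_pos hnb]
    have hcne : current ≠ neighbor := hsome_ne neighbor hnb current (by simp [hdc])
    have hnbnone : dist.get? neighbor = none := by
      rw [PySem.Dict.contains_eq_isSome_get?] at hnb
      exact Option.not_isSome_iff_eq_none.1 (by simp [hnb])
    refine ⟨⟨PySem.Dict.nodup_keys_insert dist neighbor _ hknd, ?_, ?_, ?_⟩, ?_, ?_⟩
    · intro v
      rw [PySem.Dict.getD_insert]
      by_cases hv : v = neighbor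
      · rw [if_pos hv]; exact PySem.Set.nodup_add _ _ (hpnd neighbor)
      · rw [if_neg hv]; exact hpnd v
    · intro v p hp
      rw [PySem.Dict.getD_insert] at hp
      by_cases hv : v = neighbor
      · rw [if_pos hv] at hp
        subst hv
        rcases (PySem.Set.mem_add _ _ _).1 hp with hold | hcur
        · obtain ⟨dv, dp, hv1, _, _⟩ := hpp v p hold
          exact absurd hv1 (by rw [hnbnone]; simp)
        · subst hcur
          refine ⟨dc + 1, dc, ?_, ?_, rfl⟩
          · rw [PySem.Dict.get?_insert, if_pos rfl, hgetDc]
          · rw [PySem.Dict.get?_insert, if_neg hcne]; exact hdc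
      · rw [if_neg hv] at hp
        obtain ⟨dv, dp, hv1, hp1, hsum⟩ := hpp v p hp
        have hpne : p ≠ neighbor := hsome_ne neighbor hnb p (by simp [hp1])
        refine ⟨dv, dp, ?_, ?_, hsum⟩
        · rw [PySem.Dict.get?_insert, if_neg hv]; exact hv1
        · rw [PySem.Dict.get?_insert, if_neg hpne]; exact hp1
    · intro v dv hv
      rw [PySem.Dict.get?_insert] at hv
      have hsz : (dist.insert neighbor (dist.getD current 0 + 1)).size = dist.size + 1 := by
        rw [PySem.Dict.size_insert, if_neg (by simp [hnb])]
      by_cases hveq : v = neighbor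
      · rw [if_pos hveq] at hv
        have hdv : dv = dc + 1 := by
          rw [hgetDc] at hv
          exact (Option.some_inj.1 hv).symm
        subst hdv
        exact ⟨by omega, by rw [hsz]; omega⟩
      · rw [if_neg hveq] at hv
        obtain ⟨h1, h2⟩ := hval v dv hv
        exact ⟨h1, by rw [hsz]; omega⟩
    · intro c hcq
      rw [PySem.Dict.contains_insert]
      rcases List.mem_append.1 hcq with hcq | hcq
      · rw [hq c hcq]; simp
      · simp only [List.mem_singleton] at hcq
        subst hcq
        simp
    · rw [PySem.Dict.contains_insert, hc]; simp
  · rw [if_neg hnb]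
    have hnbT : dist.contains neighbor = true := by
      rcases h' : dist.contains neighbor with _ | _
      · exact absurd h' hnb
      · rfl
    have hdnex : ∃ dn, dist.get? neighbor = some dn := by
      rw [PySem.Dict.contains_eq_isSome_get?] at hnbT
      exact Option.isSome_iff_exists.1 hnbT
    obtain ⟨dn, hdn⟩ := hdnex
    have hgetDn : dist.getD neighbor 0 = dn := PySem.Dict.getD_of_get?_eq_some dist 0 hdn
    by_cases heq : dist.getD neighbor 0 = dist.getD current 0 + 1
    · rw [if_pos heq]
      refine ⟨⟨hknd, ?_, ?_, hval⟩, hq, hc⟩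
      · intro v
        rw [PySem.Dict.getD_insert]
        by_cases hv : v = neighbor
        · rw [if_pos hv]; exact PySem.Set.nodup_add _ _ (hpnd neighbor)
        · rw [if_neg hv]; exact hpnd v
      · intro v p hp
        rw [PySem.Dict.getD_insert] at hp
        by_cases hv : v = neighbor
        · rw [if_pos hv] at hp
          subst hv
          rcases (PySem.Set.mem_add _ _ _).1 hp with hold | hcur
          · exact hpp v p hold
          · subst hcur
            refine ⟨dn, dc, hdn, hdc, ?_⟩
            rw [hgetDn, hgetDc] at heq
            omega
        · rw [if_neg hv] at hp
          exact hpp v p hp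
    · rw [if_neg heq]
      exact ⟨⟨hknd, hpnd, hpp, hval⟩, hq, hc⟩

theorem pvBfsLoop_inv :
    ∀ (fuel : Nat) (graph : PySem.Dict Int (List Int)) (dist : PySem.Dict Int Int)
      (preds : PySem.Dict Int (PySem.Set Int)) (queue : List Int),
      pvInv dist preds → (∀ c ∈ queue, dist.contains c = true) →
      pvInv (pvBfsLoop fuel graph dist preds queue).1 (pvBfsLoop fuel graph dist preds queue).2 := by
  intro fuel
  induction fuel with
  | zero => intro graph dist preds queue h _; exact h
  | succ fuel ih =>
    intro graph dist preds queue h hq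
    match queue with
    | [] => exact h
    | current :: rest =>
      rw [pvBfsLoop]
      have hst : pvStInv current ((pvSortedInts (graph.getD current [])).foldl
          (pvBfsStep current) (dist, preds, rest)) := by
        refine pv_foldl_preserve (pvBfsStep current)
          (fun s x hs => pvBfsStep_inv current x s hs) _ _ ?_
        exact ⟨h, fun c hc => hq c (by simp [hc]), hq current (by simp)⟩
      exact ih graph _ _ _ hst.1 hst.2.1

theorem pvSetup_inv (section_graph : List (Int × List Int)) (source_sections : List Int)
    (src : PySem.Set Int) :
    pvInv (pvSetup section_graph source_sections src).1 (pvSetup section_graph source_sections src).2 := by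
  unfold pvSetup
  have h0 : ((((pvSortedInts src).foldl
        (fun (st : PySem.Dict Int Int × List Int) s => (st.1.insert s 0, st.2 ++ [s]))
        (PySem.Dict.empty, []))).1.keys.Nodup ∧
       (∀ v d, (((pvSortedInts src).foldl
        (fun (st : PySem.Dict Int Int × List Int) s => (st.1.insert s 0, st.2 ++ [s]))
        (PySem.Dict.empty, []))).1.get? v = some (d : Int) → d = 0) ∧
       (∀ c ∈ (((pvSortedInts src).foldl
        (fun (st : PySem.Dict Int Int × List Int) s => (st.1.insert s 0, st.2 ++ [s]))
        (PySem.Dict.empty, []))).2,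
          (((pvSortedInts src).foldl
        (fun (st : PySem.Dict Int Int × List Int) s => (st.1.insert s 0, st.2 ++ [s]))
        (PySem.Dict.empty, []))).1.contains c = true)) := by
    refine pv_foldl_preserve
      (P := fun (st : PySem.Dict Int Int × List Int) => st.1.keys.Nodup ∧
        (∀ v d, st.1.get? v = some (d : Int) → d = 0) ∧
        (∀ c ∈ st.2, st.1.contains c = true)) _ ?_ _ _ ?_
    · intro s x hs
      obtain ⟨h1, h2, h3⟩ := hs
      refine ⟨PySem.Dict.nodup_keys_insert _ _ _ h1, ?_, ?_⟩
      · intro v d hv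
        rw [PySem.Dict.get?_insert] at hv
        by_cases hvx : v = x
        · rw [if_pos hvx] at hv
          exact (Option.some_inj.1 hv).symm
        · rw [if_neg hvx] at hv
          exact h2 v d hv
      · intro c hcq
        rw [PySem.Dict.contains_insert]
        rcases List.mem_append.1 hcq with hcq | hcq
        · rw [h3 c hcq]; simp
        · simp only [List.mem_singleton] at hcq
          subst hcq
          simp
    · refine ⟨PySem.Dict.nodup_keys_empty, ?_, ?_⟩
      · intro v d hv
        rw [PySem.Dict.get?_empty] at hv
        cases hv
      · intro c hc
        exact absurd hc (List.not_mem_nil)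
  obtain ⟨hk, hz, hqc⟩ := h0
  refine pvBfsLoop_inv _ _ _ _ _ ⟨hk, ?_, ?_, ?_⟩ hqc
  · intro v
    rw [PySem.Dict.getD_empty]
    exact List.nodup_nil
  · intro v p hp
    rw [PySem.Dict.getD_empty] at hp
    exact absurd hp (List.not_mem_nil)
  · intro v dv hv
    have hdz := hz v dv hv
    subst hdz
    refine ⟨le_refl 0, ?_⟩
    have hmem : v ∈ (((pvSortedInts src).foldl
        (fun (st : PySem.Dict Int Int × List Int) s => (st.1.insert s 0, st.2 ++ [s]))
        (PySem.Dict.empty, []))).1.keys := by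
      by_contra hnm
      rw [← PySem.Dict.get?_eq_none_iff_not_mem_keys] at hnm
      rw [hnm] at hv
      cases hv
    have hlen := List.length_pos_of_mem hmem
    simp only [PySem.Dict.keys, List.length_map] at hlen
    simpa [PySem.Dict.size] using hlen

-- ---------- the shared tail after BFS: A's phase equals B's phase ----------

theorem pv_phase_eq (dist : PySem.Dict Int Int) (preds : PySem.Dict Int (PySem.Set Int))
    (src : PySem.Set Int) (hinv : pvInv dist preds) (best : List Int)
    (hbnd : best.Nodup) (hbm : ∀ t ∈ best, dist.contains t = true) :
    ((best.foldl (fun res t => pvBacktrack (dist.size + 1) t preds src [] res 2) []).foldl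
      (fun (st : List (List Int) × PySem.Set (List Int)) p =>
        if PySem.Set.contains st.2 p then st else (st.1 ++ [p], PySem.Set.add st.2 p))
      ([], PySem.Set.empty)).1
    = (best.foldl (fun acc t => acc ++
        ((PySem.List.sorted dist.keys (fun v => dist.getD v 0) false).foldl
          (fun (paths : PySem.Dict Int (List (List Int))) v =>
            if PySem.Set.contains src v then paths.insert v [[v]]
            else
              let collected := (pvSortedInts (preds.getD v [])).foldl
                (fun acc p => (paths.getD p []).foldl (fun a q => a ++ [q ++ [v]]) acc) []
              paths.insert v (collected.take 2)) PySem.Dict.empty).getD t []) []).take 2 := by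
  obtain ⟨hknd, hpnd, hpp, hval⟩ := hinv
  have hr : ∀ v, ∀ p ∈ pvPredsOf preds v, pvRk dist p < pvRk dist v := by
    intro v p hp
    have hp' : p ∈ preds.getD v [] := (PySem.List.mem_sorted _ _ _ p).1 hp
    obtain ⟨dv, dp, hv1, hp1, hs⟩ := hpp v p hp'
    have h0p := (hval p dp hp1).1
    unfold pvRk
    rw [PySem.Dict.getD_of_get?_eq_some dist 0 hv1, PySem.Dict.getD_of_get?_eq_some dist 0 hp1]
    omega
  have hkey : ∀ v, ∀ p ∈ pvPredsOf preds v, dist.getD p 0 < dist.getD v 0 := by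
    intro v p hp
    have hp' : p ∈ preds.getD v [] := (PySem.List.mem_sorted _ _ _ p).1 hp
    obtain ⟨dv, dp, hv1, hp1, hs⟩ := hpp v p hp'
    rw [PySem.Dict.getD_of_get?_eq_some dist 0 hv1, PySem.Dict.getD_of_get?_eq_some dist 0 hp1]
    omega
  have hprnd : ∀ v, (pvPredsOf preds v).Nodup := by
    intro v
    exact ((PySem.List.sorted_perm _ _ _).nodup_iff).2 (hpnd v)
  have hF : ∀ t ∈ best, pvRk dist t < dist.size + 1 := by
    intro t ht
    have hct := hbm t ht
    rw [PySem.Dict.contains_eq_isSome_get?] at hct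
    obtain ⟨dv, hdv⟩ := Option.isSome_iff_exists.1 hct
    obtain ⟨h0, hlt⟩ := hval t dv hdv
    unfold pvRk
    rw [PySem.Dict.getD_of_get?_eq_some dist 0 hdv]
    omega
  have hA : best.foldl (fun res t => pvBacktrack (dist.size + 1) t preds src [] res 2) []
      = (best.flatMap (pvEfix src (pvPredsOf preds) (pvRk dist))).take 2 := by
    rw [pvAllPaths_spec preds src (pvRk dist) (dist.size + 1) hr best [] hF]
    simp
  have hnodup : (best.flatMap (pvEfix src (pvPredsOf preds) (pvRk dist))).Nodup := by
    refine pv_nodup_flatMap _ best hbnd ?_ ?_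
    · intro t _
      exact pvEfix_nodup src _ _ hr hprnd (pvRk dist t + 1) t (by omega)
    · intro a _ b _ hab q hq hq'
      obtain ⟨qa, hqa⟩ := pvEfix_ends src _ _ hr a q hq
      obtain ⟨qb, hqb⟩ := pvEfix_ends src _ _ hr b q hq'
      have h1 : q.getLast? = some a := by rw [hqa]; exact List.getLast?_concat
      have h2 : q.getLast? = some b := by rw [hqb]; exact List.getLast?_concat
      rw [h1] at h2
      exact hab (Option.some_inj.1 h2)
  have htake_nodup : ((best.flatMap (pvEfix src (pvPredsOf preds) (pvRk dist))).take 2).Nodup :=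
    (List.take_sublist _ _).nodup hnodup
  have hdedup := pvDedup_id ((best.flatMap (pvEfix src (pvPredsOf preds) (pvRk dist))).take 2)
    [] PySem.Set.empty htake_nodup
    (by intro x _
        rw [← Bool.not_eq_true, PySem.Set.contains_iff]
        intro hmem
        exact absurd hmem (List.not_mem_nil))
  rw [hA, hdedup, List.nil_append]
  -- B side: the DP dictionary
  have hDP := pvDP_spec dist preds src hr hkey
    (PySem.List.sorted dist.keys (fun v => dist.getD v 0) false) [] PySem.Dict.empty
    (by intro w
        rw [PySem.Dict.getD_empty]
        simp)
    (by intro v hv p hp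
        have hp' : p ∈ preds.getD v [] := (PySem.List.mem_sorted _ _ _ p).1 hp
        obtain ⟨dv, dp, hv1, hp1, hs⟩ := hpp v p hp'
        have hmemk : p ∈ dist.keys := by
          by_contra hnm
          rw [← PySem.Dict.get?_eq_none_iff_not_mem_keys] at hnm
          rw [hnm] at hp1
          cases hp1
        rw [List.nil_append]
        exact (PySem.List.mem_sorted _ _ _ p).2 hmemk)
    (by simpa using PySem.List.sorted_pairwise dist.keys (fun v => dist.getD v 0))
  have hBfold : best.foldl (fun acc t => acc ++
        ((PySem.List.sorted dist.keys (fun v => dist.getD v 0) false).foldl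
          (fun (paths : PySem.Dict Int (List (List Int))) v =>
            if PySem.Set.contains src v then paths.insert v [[v]]
            else
              let collected := (pvSortedInts (preds.getD v [])).foldl
                (fun acc p => (paths.getD p []).foldl (fun a q => a ++ [q ++ [v]]) acc) []
              paths.insert v (collected.take 2)) PySem.Dict.empty).getD t []) []
      = best.flatMap (fun t => (pvEfix src (pvPredsOf preds) (pvRk dist) t).take 2) := by
    rw [PySem.List.foldl_congr_mem' best _
      (fun acc t => acc ++ (pvEfix src (pvPredsOf preds) (pvRk dist) t).take 2) [] ?_]
    · rw [PySem.List.foldl_append_eq_flatMap, List.nil_append]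
    · intro t ht acc
      have hDPt := hDP t
      rw [List.nil_append] at hDPt
      have hct := hbm t ht
      rw [PySem.Dict.contains_iff_mem_keys] at hct
      have hto : t ∈ PySem.List.sorted dist.keys (fun v => dist.getD v 0) false :=
        (PySem.List.mem_sorted _ _ _ t).2 hct
      rw [hDPt, if_pos hto]
  rw [hBfold, pv_take_flatMap_take 2 _ best 2 (le_refl 2)]



theorem pv_core (dist : PySem.Dict Int Int) (preds : PySem.Dict Int (PySem.Set Int))
    (src tgt : PySem.Set Int) (hinv : pvInv dist preds) (htgt : tgt.Nodup) :
    (let reachable := (pvSortedInts tgt).filter (fun s => dist.contains s)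
     if reachable = [] then ((none : Option (List Int)), some "No path from the root network reaches the endpoint anchor.")
     else
      let shortest := (PySem.List.min? (reachable.map (fun s => dist.getD s 0)) (fun x => x)).getD 0
      let best := reachable.filter (fun s => dist.getD s 0 == shortest)
      let allPaths := best.foldl (fun res t => pvBacktrack (dist.size + 1) t preds src [] res 2) []
      let uniq := (allPaths.foldl
        (fun (st : List (List Int) × PySem.Set (List Int)) p =>
          if PySem.Set.contains st.2 p then st else (st.1 ++ [p], PySem.Set.add st.2 p))
        ([], PySem.Set.empty)).1
      if uniq.length ≠ 1 then (none, some "Multiple equally short section paths were found.")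
      else (uniq[0]?, none))
    = (let reachable := (pvSortedInts tgt).filter (fun s => dist.contains s)
     if reachable = [] then ((none : Option (List Int)), some "No path from the root network reaches the endpoint anchor.")
     else
      let shortest := (PySem.List.min? (reachable.map (fun s => dist.getD s 0)) (fun x => x)).getD 0
      let best := reachable.filter (fun s => dist.getD s 0 == shortest)
      let order := PySem.List.sorted dist.keys (fun v => dist.getD v 0) false
      let paths := order.foldl
        (fun (paths : PySem.Dict Int (List (List Int))) v =>
          if PySem.Set.contains src v then paths.insert v [[v]]
          else
            let collected := (pvSortedInts (preds.getD v [])).foldl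
              (fun acc p => (paths.getD p []).foldl (fun a q => a ++ [q ++ [v]]) acc) []
            paths.insert v (collected.take 2))
        PySem.Dict.empty
      let candidates := (best.foldl (fun acc t => acc ++ paths.getD t []) []).take 2
      if candidates.length ≠ 1 then (none, some "Multiple equally short section paths were found.")
      else (candidates[0]?, none)) := by
  dsimp only
  by_cases hre : (pvSortedInts tgt).filter (fun s => dist.contains s) = []
  · rw [if_pos hre, if_pos hre]
  · rw [if_neg hre, if_neg hre]
    have hbnd : (((pvSortedInts tgt).filter (fun s => dist.contains s)).filter
        (fun s => dist.getD s 0 == (PySem.List.min? (((pvSortedInts tgt).filter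
          (fun s => dist.contains s)).map (fun s => dist.getD s 0)) (fun x => x)).getD 0)).Nodup := by
      refine List.Nodup.filter _ (List.Nodup.filter _ ?_)
      exact ((PySem.List.sorted_perm _ _ _).nodup_iff).2 htgt
    have hbm : ∀ t ∈ ((pvSortedInts tgt).filter (fun s => dist.contains s)).filter
        (fun s => dist.getD s 0 == (PySem.List.min? (((pvSortedInts tgt).filter
          (fun s => dist.contains s)).map (fun s => dist.getD s 0)) (fun x => x)).getD 0),
        dist.contains t = true := by
      intro t ht
      have ht2 := List.mem_of_mem_filter ht
      exact (List.mem_filter.1 ht2).2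
    rw [pv_phase_eq dist preds src hinv _ hbnd hbm]



-- ===== VERDICT (by name: the statement is the Claim_ definition above) =====
theorem find_unique_shortest_path_spec : Claim_equal_find_unique_shortest_path := by
  intro section_graph source_sections target_sections _
  unfold Spec_find_unique_shortest_path find_unique_shortest_path find_unique_shortest_path_alt
  by_cases h1 : (PySem.Set.ofList source_sections : PySem.Set Int) = []
  · simp only [h1, if_pos]
  · simp only [if_neg h1]
    by_cases h2 : (PySem.Set.ofList target_sections : PySem.Set Int) = []
    · simp only [h2, if_pos]
    · simp only [if_neg h2]
      exact pv_core (pvSetup section_graph source_sections (PySem.Set.ofList source_sections)).1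
        (pvSetup section_graph source_sections (PySem.Set.ofList source_sections)).2
        (PySem.Set.ofList source_sections) (PySem.Set.ofList target_sections)
        (pvSetup_inv section_graph source_sections (PySem.Set.ofList source_sections))
        (PySem.Set.nodup_ofList target_sections)
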